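-- pv_equiv track=rewrite | github.com/ziutus/ai_assistant_lenie | backend/library/article_extractor.py | _trim_markdown_navigation
-- ===== SOURCE A (Python) =====
-- def _trim_markdown_navigation(markdown_text: str) -> str:
--     """Przytnij oczywistą nawigację z początku markdown.
--
--     Szuka ostatniego nagłówka H1 (#) — portale często mają kilka H1,
--     a właściwy artykuł jest pod ostatnim. Zwraca tekst od 3 linii przed nim.
--     Jeśli nie znajdzie H1, zwraca ostatnie 60% tekstu.
--     """
--     lines = markdown_text.splitlines()
--
--     # Znajdź OSTATNI H1 (właściwy artykuł jest zwykle pod ostatnim)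
--     last_h1 = None
--     for i, line in enumerate(lines):
--         if line.startswith("# ") and len(line) > 10:
--             last_h1 = i
--
--     if last_h1 is not None:
--         start = max(0, last_h1 - 3)
--         return "\n".join(lines[start:])
--
--     # Fallback: weź ostatnie 60%
--     start = len(lines) * 4 // 10
--     return "\n".join(lines[start:])
-- ===== SOURCE B (Python) =====
-- def _trim_markdown_navigation(markdown_text: str) -> str:
--     """Streaming version: one pass that builds the kept tail directly.
--
--     Maintains a sliding window of the 3 most recent lines; whenever a
--     qualifying H1 appears the output buffer is reset to window + [line],
--     and otherwise lines are appended to an active buffer.  No indices,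
--     no enumerate, no slice except in the no-H1 fallback.
--     """
--     lines = markdown_text.splitlines()
--     window = []      # at most the 3 most recent earlier lines
--     kept = None      # lines from 3-before-the-last-H1 onward, or None
--     for line in lines:
--         if line.startswith("# ") and len(line) > 10:
--             kept = window + [line]
--         elif kept is not None:
--             kept.append(line)
--         if len(window) == 3:
--             window.pop(0)
--         window.append(line)
--     if kept is None:
--         kept = lines[len(lines) * 4 // 10:]
--     return "\n".join(kept)
-- ===== Notes on version B (the rewrite author's own statement) =====
-- stated objective: alternative
-- what changed: B is a single streaming pass that builds the kept tail as it goes: it keeps a 3-line sliding window and an output buffer that is reset to window+[line] at each qualifying H1 and extended otherwise, so no line indices, enumerate or end-of-pass slicing are used (slicing remains only in the no-H1 fallback), whereas A records the last H1 index and slices afterwards.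
import Mathlib
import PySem

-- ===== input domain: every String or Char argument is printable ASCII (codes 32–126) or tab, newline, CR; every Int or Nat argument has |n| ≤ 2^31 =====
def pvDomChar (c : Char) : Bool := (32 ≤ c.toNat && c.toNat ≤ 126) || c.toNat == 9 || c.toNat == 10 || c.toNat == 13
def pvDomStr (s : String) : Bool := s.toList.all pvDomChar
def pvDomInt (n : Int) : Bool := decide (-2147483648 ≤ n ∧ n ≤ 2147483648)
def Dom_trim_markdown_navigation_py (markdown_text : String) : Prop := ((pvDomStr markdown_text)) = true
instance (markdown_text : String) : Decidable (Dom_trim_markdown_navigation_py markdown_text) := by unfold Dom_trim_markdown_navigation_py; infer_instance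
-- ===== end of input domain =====

-- B replaces A's index-recording pass + final slice by a single streaming pass that builds the kept tail directly (3-line sliding window, buffer reset at each qualifying H1); alternative decomposition, same cost.


-- ===== PORT A =====
-- forward pass over enumerate(lines), overwriting last_h1 at every match, then slice
def trim_markdown_navigation_py (markdown_text : String) : String :=
  let lines := PySem.Str.splitlines markdown_text
  let last_h1 : Option Int :=
    (PySem.List.enumerate lines 0).foldl
      (fun acc p =>
        if PySem.Str.startswith p.2 "# " && decide (10 < PySem.Str.len p.2) then some p.1 else acc)
      none
  match last_h1 with
  | some i =>
      let start : Int := max 0 (i - 3)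
      PySem.Str.join "\n" (PySem.List.slice lines (some start) none)
  | none =>
      let start : Int := PySem.Int.floordiv (PySem.List.len lines * 4) 10
      PySem.Str.join "\n" (PySem.List.slice lines (some start) none)

-- ===== PORT B =====
-- B's loop body: update (window, kept) for one line, exactly as in Source B
def pvStep (st : List String × Option (List String)) (line : String) :
    List String × Option (List String) :=
  let kept :=
    if PySem.Str.startswith line "# " && decide (10 < PySem.Str.len line) then
      some (st.1 ++ [line])
    else
      st.2.map (fun k => k ++ [line])
  let window := (if st.1.length == 3 then st.1.drop 1 else st.1) ++ [line]
  (window, kept)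

def trim_markdown_navigation_py_alt (markdown_text : String) : String :=
  let lines := PySem.Str.splitlines markdown_text
  let st := lines.foldl pvStep ([], none)
  match st.2 with
  | some kept => PySem.Str.join "\n" kept
  | none =>
      let start : Int := PySem.Int.floordiv (PySem.List.len lines * 4) 10
      PySem.Str.join "\n" (PySem.List.slice lines (some start) none)

-- ===== PRECONDITION & SPEC =====
def Spec_trim_markdown_navigation_py (markdown_text : String) (out : String) : Prop := out = trim_markdown_navigation_py_alt markdown_text
instance (markdown_text : String) (out : String) : Decidable (Spec_trim_markdown_navigation_py markdown_text out) := by unfold Spec_trim_markdown_navigation_py; infer_instance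

-- ===== CLAIM =====
def Claim_equal_trim_markdown_navigation_py : Prop := ∀ (markdown_text : String), Dom_trim_markdown_navigation_py markdown_text → Spec_trim_markdown_navigation_py markdown_text (trim_markdown_navigation_py markdown_text)

-- ===== LEMMAS AND PROOFS =====

-- last matching index, defined structurally (characterises A's fold)
def pvLastIdx : List String → Option Nat
  | [] => none
  | x :: xs =>
      match pvLastIdx xs with
      | some k => some (k + 1)
      | none =>
          if PySem.Str.startswith x "# " && decide (10 < PySem.Str.len x) then some 0 else none

theorem foldA_eq (xs : List String) (s : Int) (acc : Option Int) :
    (PySem.List.enumerate xs s).foldl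
      (fun acc p =>
        if PySem.Str.startswith p.2 "# " && decide (10 < PySem.Str.len p.2) then some p.1 else acc)
      acc
    = match pvLastIdx xs with
      | some k => some (s + k)
      | none => acc := by
  induction xs generalizing s acc with
  | nil => simp [pvLastIdx, PySem.List.enumerate_nil]
  | cons x xs ih =>
    rw [PySem.List.enumerate_cons]
    simp only [List.foldl_cons]
    rw [ih]
    cases h : pvLastIdx xs with
    | some k => simp [pvLastIdx, h]; ring
    | none =>
      simp only [pvLastIdx, h]
      cases hc : (PySem.Str.startswith x "# " && decide (10 < PySem.Str.len x))
      · simp only [Bool.false_eq_true, if_false]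
      · simp only [if_true]; norm_num

theorem lastIdx_append (xs : List String) (x : String) :
    pvLastIdx (xs ++ [x]) =
      if PySem.Str.startswith x "# " && decide (10 < PySem.Str.len x) then some xs.length
      else pvLastIdx xs := by
  induction xs with
  | nil => simp only [List.nil_append, pvLastIdx, List.length_nil]
  | cons y ys ihy =>
    simp only [List.cons_append, pvLastIdx, ihy]
    cases hc : (PySem.Str.startswith x "# " && decide (10 < PySem.Str.len x))
    · simp only [Bool.false_eq_true, if_false]
    · simp only [if_true, List.length_cons]

theorem lastIdx_lt (xs : List String) (k : Nat) (h : pvLastIdx xs = some k) : k < xs.length := by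
  induction xs generalizing k with
  | nil => simp [pvLastIdx] at h
  | cons x xs ih =>
    cases h' : pvLastIdx xs with
    | some m =>
      simp only [pvLastIdx, h', Option.some.injEq] at h
      subst h
      have := ih m h'
      simp only [List.length_cons]
      omega
    | none =>
      simp only [pvLastIdx, h'] at h
      split at h
      · simp only [Option.some.injEq] at h
        subst h
        simp
      · exact absurd h (by simp)

-- B's invariant: the window is the ≤3-line tail of the processed prefix; the buffer,
-- when active, is exactly the tail from 3 lines before the last H1 seen so far.
theorem foldB_inv (xs : List String) :
    xs.foldl pvStep ([], none)
      = (xs.drop (xs.length - 3), (pvLastIdx xs).map (fun k => xs.drop (k - 3))) := by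
  induction xs using List.reverseRecOn with
  | nil => rfl
  | append_singleton xs x ih =>
    rw [List.foldl_append, ih]
    simp only [List.foldl_cons, List.foldl_nil]
    unfold pvStep
    rw [lastIdx_append]
    cases hc : (PySem.Str.startswith x "# " && decide (10 < PySem.Str.len x))
    · simp only [Bool.false_eq_true, if_false]
      refine Prod.ext ?_ ?_
      · -- window component
        simp only
        by_cases h3 : xs.length ≥ 3
        · have : (xs.drop (xs.length - 3)).length = 3 := by
            simp [List.length_drop]; omega
          rw [if_pos (by simpa using this)]
          rw [List.drop_drop]
          rw [← List.drop_append_of_le_length (by simp; omega)]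
          congr 1
          simp; omega
        · have hlen : (xs.drop (xs.length - 3)).length = xs.length := by
            simp [List.length_drop]; omega
          rw [if_neg (by simp [hlen]; omega)]
          have h0 : xs.length - 3 = 0 := by omega
          have h0' : xs.length + 1 - 3 = 0 := by omega
          simp [h0, List.length_append, h0']
      · -- kept component
        simp only
        cases h' : pvLastIdx xs with
        | none => simp
        | some k =>
          have hk := lastIdx_lt xs k h'
          simp only [Option.map_some]
          congr 1
          rw [List.drop_append_of_le_length (by omega)]
    · simp only [if_true]
      refine Prod.ext ?_ ?_
      · -- window component (same as above)
        simp only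
        by_cases h3 : xs.length ≥ 3
        · have : (xs.drop (xs.length - 3)).length = 3 := by
            simp [List.length_drop]; omega
          rw [if_pos (by simpa using this)]
          rw [List.drop_drop]
          rw [← List.drop_append_of_le_length (by simp; omega)]
          congr 1
          simp; omega
        · have hlen : (xs.drop (xs.length - 3)).length = xs.length := by
            simp [List.length_drop]; omega
          rw [if_neg (by simp [hlen]; omega)]
          have h0 : xs.length - 3 = 0 := by omega
          have h0' : xs.length + 1 - 3 = 0 := by omega
          simp [h0, List.length_append, h0']
      · -- kept = window ++ [x] = (xs ++ [x]).drop (xs.length - 3)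
        simp only [Option.map_some]
        congr 1
        rw [List.drop_append_of_le_length (by omega)]

-- the Int slice A takes equals the Nat drop B's buffer holds
theorem slice_eq_drop (xs : List String) (k : Nat) :
    PySem.List.slice xs (some (max 0 ((0 : Int) + (k : Int) - 3))) none = xs.drop (k - 3) := by
  have h : max 0 ((0 : Int) + (k : Int) - 3) = ((k - 3 : Nat) : Int) := by omega
  rw [h, PySem.List.slice_from_natCast]

-- ===== VERDICT =====
theorem trim_markdown_navigation_py_spec : Claim_equal_trim_markdown_navigation_py := by
  intro t _
  unfold Spec_trim_markdown_navigation_py trim_markdown_navigation_py trim_markdown_navigation_py_alt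
  dsimp only
  rw [foldA_eq, foldB_inv]
  cases h : pvLastIdx (PySem.Str.splitlines t) with
  | none => rfl
  | some k =>
    simp only [Option.map_some]
    rw [slice_eq_drop]
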